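-- pv_equiv track=rewrite | github.com/Abhi-she-k/PythonProblems | labs109Solutions.py | bandwidth
-- ===== SOURCE A (Python) =====
-- def bandwidth(edges):
--     n = len(edges)
--
--     def try_bandwidth(limit):
--         """Try to find a numbering with given bandwidth limit"""
--         numbering = [-1] * n  # numbering[node] = assigned number
--         used = [False] * n  # used[number] = whether number is used
--
--         def backtrack(node_idx):
--             """Try to assign numbers to nodes"""
--             # Base case: all nodes numbered
--             if node_idx == n:
--                 return True
--
--             # Choose next node to number (could be optimized)
--
--             # FIX 1: In the default implementation, the next node we assign is just the sequential nodes starting from 0;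
--             # this implementation is not as fast as picking a node that is already limited to a small number of options,
--             # meaning we are reducing our branching as well as the width of the search tree. To implement this, we would
--             # be picking the node with the most neighbours that are already assigned at each recursive step. This would give
--             # us the node with the least amount of options and branching. Overall, this would greatly reduce the branching
--             # and speed of the algorithm.
--             node = -1
--             maxEdge = float("-inf")
--
--             for i in range(n):
--
--                 if numbering[i] == -1:
--
--                     numEdge = 0
--
--                     for neighbor in edges[i]:
--                         if numbering[neighbor] != -1:
--                             numEdge += 1
--
--                     if numEdge > maxEdge:
--                         maxEdge = numEdge
--                         node = i
--
--             # Try each available number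
--             for num in range(n):
--                 if used[num]:
--                     continue
--
--                 # Check if this number violates bandwidth constraint
--                 valid = True
--                 for neighbor in edges[node]:
--                     if numbering[neighbor] != -1:
--                         if abs(num - numbering[neighbor]) > limit:
--                             valid = False
--                             break
--
--                 if valid:
--                     # Assign this number
--                     numbering[node] = num
--                     used[num] = True
--
--                     if backtrack(node_idx + 1):
--                         return True
--
--                     # Backtrack
--                     numbering[node] = -1
--                     used[num] = False
--
--             return False
--
--         return backtrack(0)
--
--     # Iterative deepening: try bandwidth 1, 2, 3, ...
--     for bw in range(1, n):
--         if try_bandwidth(bw):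
--             return bw
--
--     return n - 1
-- ===== SOURCE B (Python) =====
-- from itertools import permutations
--
--
-- def bandwidth(edges):
--     n = len(edges)
--     for bw in range(1, n):
--         for p in permutations(range(n)):
--             if all(abs(p[u] - p[v]) <= bw for u in range(n) for v in edges[u]):
--                 return bw
--     return n - 1
-- ===== Notes on version B (the rewrite author's own statement) =====
-- stated objective: alternative
-- what changed: Feasibility of each candidate limit is decided by flat enumeration of permutations of range(n), checking every listed edge, instead of A's recursive backtracking with per-step most-constrained-node selection and pruning; the outer iterative-deepening loop is unchanged. …
-- outside the precondition, e.g. on bandwidth([[], [0, 2], [0]]): A returns 1, B returns 2; on bandwidth([[5], [0]]): A raises IndexError, B raises IndexError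
import Mathlib
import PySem

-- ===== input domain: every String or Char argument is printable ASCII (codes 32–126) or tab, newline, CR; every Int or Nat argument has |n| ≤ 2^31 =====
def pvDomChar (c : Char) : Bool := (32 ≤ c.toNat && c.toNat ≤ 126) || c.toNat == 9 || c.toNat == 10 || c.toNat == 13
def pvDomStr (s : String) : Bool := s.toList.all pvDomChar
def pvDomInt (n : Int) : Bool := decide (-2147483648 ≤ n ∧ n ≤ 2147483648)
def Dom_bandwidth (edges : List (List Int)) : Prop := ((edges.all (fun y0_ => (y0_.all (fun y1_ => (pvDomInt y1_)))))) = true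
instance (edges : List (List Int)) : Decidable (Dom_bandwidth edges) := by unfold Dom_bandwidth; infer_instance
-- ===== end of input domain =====

-- B replaces A's recursive pruned backtracking by a flat scan of the permutations of range(n),
-- checking every listed edge (objective: alternative).

-- ===== PORT A =====
-- numbering[v] (Python list index, possibly negative)
def aGet (numbering : List Int) (v : Int) : Int :=
  (PySem.List.pyGet? numbering v).getD 0

-- the numEdge loop: how many neighbours of i are already numbered
def countA (numbering : List Int) (nbrs : List Int) : Int :=
  nbrs.foldl (fun c v => if aGet numbering v ≠ -1 then c + 1 else c) 0

-- the node/maxEdge selection loop; float("-inf") is the `none` start state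
def pickA (edges : List (List Int)) (numbering : List Int) : Int × Option Int :=
  (List.range numbering.length).foldl
    (fun st i =>
      if numbering.getD i 0 = -1 then
        let cnt := countA numbering (edges.getD i [])
        match st.2 with
        | none => ((i : Int), some cnt)
        | some m => if cnt > m then ((i : Int), some cnt) else st
      else st)
    (-1, none)

-- the `valid` check (break on first violating neighbour = List.all)
def validA (numbering : List Int) (nbrs : List Int) (num limit : Int) : Bool :=
  nbrs.all fun v =>
    let x := aGet numbering v
    x == -1 || decide (|num - x| ≤ limit)

-- backtrack(node_idx); fuel k = n - node_idx; the mutated numbering/used lists are passed as state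
def btA (edges : List (List Int)) (limit : Int) :
    Nat → List Int → List Bool → Bool
  | 0, _, _ => true
  | k + 1, numbering, used =>
      let node := (pickA edges numbering).1
      (List.range numbering.length).any fun num =>
        !(used.getD num false) &&
        validA numbering (edges.getD node.toNat []) (num : Int) limit &&
        btA edges limit k (numbering.set node.toNat (num : Int)) (used.set num true)

def bandwidth (edges : List (List Int)) : Int :=
  let n := edges.length
  ((PySem.List.pyRange 1 (n : Int) 1).find? fun bw =>
      btA edges bw n (List.replicate n (-1)) (List.replicate n false)).getD ((n : Int) - 1)

-- ===== PORT B =====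
-- p[v] for an int list (Python index, possibly negative)
def bGetI (xs : List Int) (v : Int) : Int :=
  (PySem.List.pyGet? xs v).getD 0

-- `all(abs(p[u] - p[v]) <= bw for u in range(n) for v in edges[u])`
def checkB (p : List Int) (edges : List (List Int)) (bw : Int) : Bool :=
  (List.range edges.length).all fun u =>
    (edges.getD u []).all fun v => decide (|p.getD u 0 - bGetI p v| ≤ bw)

def bandwidth_alt (edges : List (List Int)) : Int :=
  let n := edges.length
  ((PySem.List.pyRange 1 (n : Int) 1).find? fun bw =>
      (PySem.List.permutations ((List.range n).map (fun i : Nat => (i : Int))) n).any fun p =>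
        checkB p edges bw).getD ((n : Int) - 1)

-- ===== PRECONDITION & SPEC =====
-- Python index v ∈ [-n, n) normalised to a Nat index (used by Pre_'s symmetry condition)
def nidx (n : Nat) (v : Int) : Nat := if v < 0 then (v + n).toNat else v.toNat

-- Pre_ restricts to well-formed undirected graphs: neighbour indices in [-n, n) (outside that,
-- A raises IndexError when n >= 2; for n <= 1 A never reads a neighbour) and, for n >= 3,
-- symmetric adjacency lists — on asymmetric lists A silently drops the edges whose
-- later-visited endpoint does not list the other, an accident of its heuristic visit order
-- (on <= 2 nodes every numbering is within any positive limit, so symmetry is irrelevant).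
def Pre_bandwidth (edges : List (List Int)) : Prop :=
  edges.length ≤ 1 ∨
    ((∀ u, u < edges.length → ∀ v ∈ edges.getD u [],
        -(edges.length : Int) ≤ v ∧ v < (edges.length : Int)) ∧
     (edges.length ≤ 2 ∨
      ∀ u, u < edges.length → ∀ v ∈ edges.getD u [],
        ∃ w ∈ edges.getD (nidx edges.length v) [], nidx edges.length w = u))
instance (edges : List (List Int)) : Decidable (Pre_bandwidth edges) := by
  unfold Pre_bandwidth; infer_instance

def pvWitness_bandwidth : List (List Int) := [[1], [0, -1]]

def Spec_bandwidth (edges : List (List Int)) (out : Int) : Prop := out = bandwidth_alt edges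
instance (edges : List (List Int)) (out : Int) : Decidable (Spec_bandwidth edges out) := by
  unfold Spec_bandwidth; infer_instance

-- ===== CLAIM (what is proved, stated in full; the proofs are below) =====
def Claim_equal_bandwidth : Prop := ∀ (edges : List (List Int)), Dom_bandwidth edges → Pre_bandwidth edges → Spec_bandwidth edges (bandwidth edges)

-- ===== LEMMAS AND PROOFS =====

-- the two halves of Pre_'s second disjunct, as named proof-side conditions
def InRangeE (edges : List (List Int)) : Prop :=
  ∀ u, u < edges.length → ∀ v ∈ edges.getD u [],
    -(edges.length : Int) ≤ v ∧ v < (edges.length : Int)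

def SymE (edges : List (List Int)) : Prop :=
  ∀ u, u < edges.length → ∀ v ∈ edges.getD u [],
    ∃ w ∈ edges.getD (nidx edges.length v) [], nidx edges.length w = u

-- ---- small generic tools ----

lemma nidx_lt (n : Nat) (v : Int) (h1 : -(n:Int) ≤ v) (h2 : v < n) : nidx n v < n := by
  unfold nidx; split_ifs <;> omega

lemma pyGet?_nidx {α : Type} (xs : List α) (n : Nat) (v : Int) (hlen : xs.length = n)
    (h1 : -(n:Int) ≤ v) (h2 : v < n) : PySem.List.pyGet? xs v = xs[nidx n v]? := by
  simp only [PySem.List.pyGet?, PySem.List.pyIdx?, hlen, nidx]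
  split_ifs <;> simp_all <;> try omega
  congr 1; omega

lemma getD_pyGet?_nidx {α : Type} (xs : List α) (n : Nat) (v : Int) (d : α) (hlen : xs.length = n)
    (h1 : -(n:Int) ≤ v) (h2 : v < n) :
    (PySem.List.pyGet? xs v).getD d = xs.getD (nidx n v) d := by
  rw [pyGet?_nidx xs n v hlen h1 h2]; rfl

lemma foldl_rel {α β γ : Type} (R : β → γ → Prop) (f : β → α → β) (g : γ → α → γ) :
    ∀ (l : List α) (b : β) (c : γ), R b c →
      (∀ b c x, x ∈ l → R b c → R (f b x) (g c x)) → R (l.foldl f b) (l.foldl g c)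
  | [], b, c, h, _ => h
  | x :: l, b, c, h, hstep =>
      foldl_rel R f g l (f b x) (g c x) (hstep b c x (List.mem_cons_self) h)
        (fun b c y hy hr => hstep b c y (List.mem_cons_of_mem _ hy) hr)

lemma foldl_inv {α β : Type} (P : β → Prop) (f : β → α → β) :
    ∀ (l : List α) (b : β), P b → (∀ b x, x ∈ l → P b → P (f b x)) → P (l.foldl f b)
  | [], b, h, _ => h
  | x :: l, b, h, hstep =>
      foldl_inv P f l (f b x) (hstep b x (List.mem_cons_self) h)
        (fun b y hy hp => hstep b y (List.mem_cons_of_mem _ hy) hp)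

lemma find?_congr {α : Type} (f g : α → Bool) :
    ∀ (l : List α), (∀ x ∈ l, f x = g x) → l.find? f = l.find? g
  | [], _ => rfl
  | x :: l, h => by
      simp only [List.find?_cons, h x (List.mem_cons_self)]
      cases g x with
      | true => rfl
      | false => exact find?_congr f g l (fun y hy => h y (List.mem_cons_of_mem _ hy))

lemma nodup_of_getElem_ne {α : Type} (l : List α)
    (h : ∀ i (_ : i < l.length) (j) (_ : j < l.length), i ≠ j → l[i] ≠ l[j]) : l.Nodup := by
  rw [List.nodup_iff_getElem?_ne_getElem?]
  intro i j hij hj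
  simp only [List.getElem?_eq_getElem, hj, lt_trans hij hj, ne_eq, Option.some.injEq]
  exact h i (lt_trans hij hj) j hj (Nat.ne_of_lt hij)

-- the list [0, 1, …, n-1] of Ints
def intRangeL (n : Nat) : List Int := (List.range n).map (fun i : Nat => (i : Int))

lemma nodup_intRangeL (n : Nat) : (intRangeL n).Nodup := by
  have hinj : Function.Injective (fun i : Nat => (i : Int)) := fun a b h => by simpa using h
  exact List.Nodup.map hinj List.nodup_range

lemma mem_intRangeL (n : Nat) (x : Int) : x ∈ intRangeL n ↔ ∃ i : Nat, i < n ∧ x = (i:Int) := by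
  simp only [intRangeL, List.mem_map, List.mem_range]
  constructor
  · rintro ⟨a, ha, rfl⟩; exact ⟨a, ha, rfl⟩
  · rintro ⟨i, hi, rfl⟩; exact ⟨i, hi, rfl⟩

lemma length_intRangeL (n : Nat) : (intRangeL n).length = n := by simp [intRangeL]

lemma getD_intRangeL (n u : Nat) (hu : u < n) : (intRangeL n).getD u 0 = (u:Int) := by
  rw [List.getD_eq_getElem _ 0 (by rw [length_intRangeL]; exact hu)]
  simp [intRangeL]

-- ---- A's greedy visit order, reconstructed as a placed-list iteration ----

def countB (edges : List (List Int)) (placed : List Bool) (i : Nat) : Int :=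
  (edges.getD i []).foldl
    (fun c v => if (PySem.List.pyGet? placed v).getD false then c + 1 else c) 0

def pickB (edges : List (List Int)) (placed : List Bool) : Int × Int :=
  (List.range placed.length).foldl
    (fun st i =>
      if placed.getD i false = false then
        let cnt := countB edges placed i
        if cnt > st.2 then ((i : Int), cnt) else st
      else st)
    (-1, -1)

def stepOrd (edges : List (List Int)) (st : List Bool × List Int) : List Bool × List Int :=
  (st.1.set ((pickB edges st.1).1).toNat true, st.2 ++ [(pickB edges st.1).1])

def stJ (edges : List (List Int)) (j : Nat) : List Bool × List Int :=
  (stepOrd edges)^[j] (List.replicate edges.length false, [])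

def ordF (edges : List (List Int)) : List Int := (stJ edges edges.length).2

def posF (edges : List (List Int)) (u : Nat) : Nat := (ordF edges).idxOf (u:Int)

def GoodSt (edges : List (List Int)) (j : Nat) (st : List Bool × List Int) : Prop :=
  st.1.length = edges.length ∧ st.2.length = j ∧ st.2.Nodup ∧
  (∀ x ∈ st.2, ∃ i : Nat, i < edges.length ∧ x = (i:Int)) ∧
  (∀ i, i < edges.length → (st.1.getD i false = true ↔ (i:Int) ∈ st.2))

lemma countB_nonneg (edges : List (List Int)) (placed : List Bool) (i : Nat) :
    0 ≤ countB edges placed i := by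
  unfold countB
  exact foldl_inv (fun c : Int => 0 ≤ c) _ _ 0 le_rfl (by intro b x _ hb; split_ifs <;> omega)

lemma pickB_spec (edges : List (List Int)) (placed : List Bool)
    (i0 : Nat) (hi0 : i0 < placed.length) (hup : placed.getD i0 false = false) :
    ∃ i : Nat, i < placed.length ∧ (pickB edges placed).1 = (i:Int) ∧ placed.getD i false = false := by
  unfold pickB
  set n := placed.length with hn
  set f := (fun (st : Int × Int) (i : Nat) =>
      if placed.getD i false = false then
        let cnt := countB edges placed i
        if cnt > st.2 then ((i : Int), cnt) else st
      else st) with hf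
  have hPRstep : ∀ (st : Int × Int) (i : Nat), i < n →
      (∃ i' : Nat, i' < n ∧ st.1 = (i':Int) ∧ placed.getD i' false = false ∧ 0 ≤ st.2) →
      (∃ i' : Nat, i' < n ∧ (f st i).1 = (i':Int) ∧ placed.getD i' false = false ∧ 0 ≤ (f st i).2) := by
    intro st i hi ⟨i', hi', h1, h2, h3⟩
    rw [hf]; dsimp only
    split_ifs with hp hc
    · exact ⟨i, hi, rfl, hp, countB_nonneg edges placed i⟩
    · exact ⟨i', hi', h1, h2, h3⟩
    · exact ⟨i', hi', h1, h2, h3⟩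
  have hRstep : ∀ (st : Int × Int) (i : Nat), i < n →
      (st = (-1, -1) ∨ ∃ i' : Nat, i' < n ∧ st.1 = (i':Int) ∧ placed.getD i' false = false ∧ 0 ≤ st.2) →
      ((f st i) = (-1, -1) ∨ ∃ i' : Nat, i' < n ∧ (f st i).1 = (i':Int) ∧ placed.getD i' false = false ∧ 0 ≤ (f st i).2) := by
    intro st i hi h
    rcases h with h | h
    · subst h; rw [hf]; dsimp only
      split_ifs with hp hc
      · exact Or.inr ⟨i, hi, rfl, hp, countB_nonneg edges placed i⟩
      · exact Or.inl rfl
      · exact Or.inl rfl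
    · exact Or.inr (hPRstep st i hi h)
  have hsplit : List.range n = (List.range i0 ++ [i0]) ++ (List.range (n - (i0+1))).map (fun x => (i0+1) + x) := by
    rw [← List.range_succ, ← List.range_add]
    congr 1; omega
  rw [hsplit, List.foldl_append, List.foldl_append]
  set st1 := List.foldl f (-1, -1) (List.range i0) with hst1
  have hR1 : st1 = (-1, -1) ∨ ∃ i' : Nat, i' < n ∧ st1.1 = (i':Int) ∧ placed.getD i' false = false ∧ 0 ≤ st1.2 := by
    rw [hst1]
    refine foldl_inv (fun st : Int × Int => st = (-1, -1) ∨ ∃ i' : Nat, i' < n ∧ st.1 = (i':Int) ∧ placed.getD i' false = false ∧ 0 ≤ st.2) f (List.range i0) (-1, -1) (Or.inl rfl) ?_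
    intro b x hx hb
    exact hRstep b x (by have := List.mem_range.mp hx; omega) hb
  have hmid : ∃ i' : Nat, i' < n ∧ (List.foldl f st1 [i0]).1 = (i':Int) ∧ placed.getD i' false = false ∧ 0 ≤ (List.foldl f st1 [i0]).2 := by
    simp only [List.foldl_cons, List.foldl_nil]
    rcases hR1 with h | h
    · rw [h, hf]; dsimp only
      rw [if_pos hup]
      rw [if_pos (by have := countB_nonneg edges placed i0; omega)]
      exact ⟨i0, hi0, rfl, hup, countB_nonneg edges placed i0⟩
    · exact hPRstep st1 i0 hi0 h
  have hfin := foldl_inv (fun st : Int × Int => ∃ i' : Nat, i' < n ∧ st.1 = (i':Int) ∧ placed.getD i' false = false ∧ 0 ≤ st.2)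
      f ((List.range (n - (i0+1))).map (fun x => (i0+1) + x)) (List.foldl f st1 [i0]) hmid ?_
  · rcases hfin with ⟨i', hi', h1, h2, _⟩
    exact ⟨i', hi', h1, h2⟩
  · intro b x hx hb
    refine hPRstep b x ?_ hb
    rcases List.mem_map.mp hx with ⟨y, hy, rfl⟩
    have := List.mem_range.mp hy; omega

lemma goodSt_step (edges : List (List Int)) (j : Nat) (st : List Bool × List Int)
    (hg : GoodSt edges j st) (hj : j < edges.length) :
    GoodSt edges (j + 1) (stepOrd edges st) := by
  obtain ⟨hl1, hl2, hnd, hent, hchar⟩ := hg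
  have hex : ∃ i0 : Nat, i0 < edges.length ∧ st.1.getD i0 false = false := by
    by_contra hno
    simp only [not_exists, not_and] at hno
    have hsub : intRangeL edges.length ⊆ st.2 := by
      intro x hx
      rcases (mem_intRangeL edges.length x).mp hx with ⟨i, hi, rfl⟩
      have := hno i hi
      have hb : st.1.getD i false = true := by
        cases heq : st.1.getD i false with
        | false => exact absurd heq this
        | true => rfl
      exact (hchar i hi).mp hb
    have := (List.subperm_of_subset (nodup_intRangeL edges.length) hsub).length_le
    rw [length_intRangeL, hl2] at this
    omega
  obtain ⟨i0, hi0, hup0⟩ := hex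
  obtain ⟨i, hi, hpick, hup⟩ := pickB_spec edges st.1 i0 (by omega) hup0
  rw [hl1] at hi
  have hnotmem : (i:Int) ∉ st.2 := by
    intro hmem
    have := (hchar i hi).mpr hmem
    rw [hup] at this; exact Bool.false_ne_true this
  refine ⟨by simp [stepOrd, hl1], by simp [stepOrd, hl2], ?_, ?_, ?_⟩
  · simp only [stepOrd, hpick]
    simp only [List.nodup_append, List.nodup_singleton, true_and, and_true]
    refine ⟨hnd, ?_⟩
    intro a ha b hb
    have hbi : b = (i:Int) := by simpa using hb
    subst hbi
    exact fun hab => hnotmem (hab ▸ ha)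
  · intro x hx
    simp only [stepOrd, hpick, List.mem_append, List.mem_singleton] at hx
    rcases hx with hx | rfl
    · exact hent x hx
    · exact ⟨i, hi, rfl⟩
  · intro i' hi'
    simp only [stepOrd, hpick, List.mem_append, List.mem_singleton]
    have htn : ((i:Int)).toNat = i := Int.toNat_natCast i
    by_cases hii : i' = i
    · subst hii
      rw [htn]
      constructor
      · intro _; exact Or.inr rfl
      · intro _
        simp [List.getD, List.getElem?_set_self, hl1 ▸ hi']
    · rw [htn]
      have : (st.1.set i true).getD i' false = st.1.getD i' false := by
        simp [List.getD, List.getElem?_set_ne (fun h => hii h.symm)]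
      rw [this, hchar i' hi']
      constructor
      · exact fun h => Or.inl h
      · rintro (h | h)
        · exact h
        · exact absurd (by exact_mod_cast h) hii

lemma goodSt_stJ (edges : List (List Int)) : ∀ j, j ≤ edges.length → GoodSt edges j (stJ edges j) := by
  intro j
  induction j with
  | zero =>
      intro _
      refine ⟨by simp [stJ], by simp [stJ], by simp [stJ], by simp [stJ], ?_⟩
      intro i hi
      simp [stJ, List.getD, List.getElem?_replicate, hi]
  | succ j ih =>
      intro hj
      have : stJ edges (j+1) = stepOrd edges (stJ edges j) := Function.iterate_succ_apply' _ j _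
      rw [this]
      exact goodSt_step edges j (stJ edges j) (ih (by omega)) (by omega)

lemma stJ2_prefix (edges : List (List Int)) (j : Nat) (hj : j ≤ edges.length) :
    (stJ edges j).2 = (ordF edges).take j := by
  have hpre : ∀ (k : Nat) (st : List Bool × List Int), st.2 <+: ((stepOrd edges)^[k] st).2 := by
    intro k
    induction k with
    | zero => intro st; simp
    | succ k ih =>
        intro st
        rw [Function.iterate_succ_apply]
        exact List.IsPrefix.trans (by simp [stepOrd]) (ih (stepOrd edges st))
  have h1 : (stJ edges j).2 <+: (ordF edges) := by
    show (stJ edges j).2 <+: (stJ edges edges.length).2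
    have : stJ edges edges.length = (stepOrd edges)^[edges.length - j] (stJ edges j) := by
      unfold stJ
      rw [← Function.iterate_add_apply]
      congr 1; omega
    rw [this]
    exact hpre (edges.length - j) (stJ edges j)
  have hlen : (stJ edges j).2.length = j := (goodSt_stJ edges j hj).2.1
  rw [List.prefix_iff_eq_take] at h1
  rw [h1, hlen]

lemma length_ordF (edges : List (List Int)) : (ordF edges).length = edges.length :=
  (goodSt_stJ edges edges.length le_rfl).2.1

lemma nodup_ordF (edges : List (List Int)) : (ordF edges).Nodup :=
  (goodSt_stJ edges edges.length le_rfl).2.2.1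

lemma ordF_perm (edges : List (List Int)) : (ordF edges).Perm (intRangeL edges.length) := by
  have hg := goodSt_stJ edges edges.length le_rfl
  have hsub : ordF edges ⊆ intRangeL edges.length := by
    intro x hx
    rcases hg.2.2.2.1 x hx with ⟨i, hi, rfl⟩
    exact (mem_intRangeL edges.length _).mpr ⟨i, hi, rfl⟩
  refine (List.subperm_of_subset (nodup_ordF edges) hsub).perm_of_length_le ?_
  rw [length_intRangeL, length_ordF]

lemma mem_ordF (edges : List (List Int)) (u : Nat) (hu : u < edges.length) : (u:Int) ∈ ordF edges := by
  rw [(ordF_perm edges).mem_iff, mem_intRangeL]; exact ⟨u, hu, rfl⟩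

lemma posF_lt (edges : List (List Int)) (u : Nat) (hu : u < edges.length) :
    posF edges u < edges.length := by
  rw [← length_ordF]; exact List.idxOf_lt_length_of_mem (mem_ordF edges u hu)

lemma ordF_posF (edges : List (List Int)) (u : Nat) (hu : u < edges.length) :
    (ordF edges)[posF edges u]'(by rw [length_ordF]; exact posF_lt edges u hu) = (u:Int) :=
  List.getElem_idxOf (by rw [length_ordF]; exact posF_lt edges u hu)

lemma posF_inj (edges : List (List Int)) (u u' : Nat) (hu : u < edges.length)
    (hu' : u' < edges.length) (h : posF edges u = posF edges u') : u = u' := by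
  have h1 := ordF_posF edges u hu
  have h2 := ordF_posF edges u' hu'
  have : (u:Int) = (u':Int) := by
    rw [← h1, ← h2]
    simp only [h]
  exact_mod_cast this

lemma stJ1_char (edges : List (List Int)) (j : Nat) (hj : j ≤ edges.length)
    (i : Nat) (hi : i < edges.length) :
    (stJ edges j).1.getD i false = true ↔ posF edges i < j := by
  have hg := goodSt_stJ edges j hj
  rw [hg.2.2.2.2 i hi, stJ2_prefix edges j hj]
  exact List.mem_take_iff_idxOf_lt (mem_ordF edges i hi)

lemma pick_stJ (edges : List (List Int)) (j : Nat) (hj : j < edges.length) :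
    (pickB edges (stJ edges j).1).1 = (ordF edges)[j]'(by rw [length_ordF]; exact hj) := by
  have hsucc : stJ edges (j+1) = stepOrd edges (stJ edges j) := Function.iterate_succ_apply' _ j _
  have h1 : (stJ edges (j+1)).2 = (ordF edges).take j ++ [(pickB edges (stJ edges j).1).1] := by
    rw [hsucc]
    show (stJ edges j).2 ++ _ = _
    rw [stJ2_prefix edges j (by omega)]
  have h2 : (stJ edges (j+1)).2 = (ordF edges).take j ++ [(ordF edges)[j]'(by rw [length_ordF]; exact hj)] := by
    rw [stJ2_prefix edges (j+1) (by omega), List.take_add_one]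
    congr 1
    rw [List.getElem?_eq_getElem (by rw [length_ordF]; exact hj)]
    rfl
  have h3 := List.append_cancel_left (h1.symm.trans h2)
  simpa using h3

-- ---- bridging A's state to the placed lists ----

def NRel (edges : List (List Int)) (numbering : List Int) (placed : List Bool) : Prop :=
  numbering.length = edges.length ∧ placed.length = edges.length ∧
  ∀ i, i < edges.length → ((numbering.getD i 0 ≠ -1) ↔ placed.getD i false = true)

lemma count_bridge (edges : List (List Int)) (hR : InRangeE edges)
    (numbering : List Int) (placed : List Bool) (hRel : NRel edges numbering placed)
    (i : Nat) (hi : i < edges.length) :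
    countA numbering (edges.getD i []) = countB edges placed i := by
  unfold countA countB
  refine PySem.List.foldl_congr_mem _ _ _ 0 ?_
  intro acc v hv
  obtain ⟨hv1, hv2⟩ := hR i hi v hv
  have hn := nidx_lt edges.length v hv1 hv2
  have ha : aGet numbering v = numbering.getD (nidx edges.length v) 0 :=
    getD_pyGet?_nidx numbering edges.length v 0 hRel.1 hv1 hv2
  have hb : (PySem.List.pyGet? placed v).getD false = placed.getD (nidx edges.length v) false :=
    getD_pyGet?_nidx placed edges.length v false hRel.2.1 hv1 hv2
  have hiff := hRel.2.2 (nidx edges.length v) hn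
  rw [ha, hb]
  exact if_congr (by rw [← hiff]) rfl rfl

lemma pick_bridge (edges : List (List Int)) (hR : InRangeE edges)
    (numbering : List Int) (placed : List Bool) (hRel : NRel edges numbering placed) :
    (pickA edges numbering).1 = (pickB edges placed).1 := by
  unfold pickA pickB
  rw [hRel.1, hRel.2.1]
  have := foldl_rel (fun (stA : Int × Option Int) (stB : Int × Int) =>
      stA.1 = stB.1 ∧ ((stA.2 = none ∧ stB.2 = -1) ∨ ∃ m : Int, stA.2 = some m ∧ stB.2 = m ∧ 0 ≤ m))
    (fun st i =>
      if numbering.getD i 0 = -1 then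
        let cnt := countA numbering (edges.getD i [])
        match st.2 with
        | none => ((i : Int), some cnt)
        | some m => if cnt > m then ((i : Int), some cnt) else st
      else st)
    (fun st i =>
      if placed.getD i false = false then
        let cnt := countB edges placed i
        if cnt > st.2 then ((i : Int), cnt) else st
      else st)
    (List.range edges.length) ((-1 : Int), (none : Option Int)) ((-1 : Int), (-1 : Int))
    ⟨rfl, Or.inl ⟨rfl, rfl⟩⟩ ?_
  · exact this.1
  · intro stA stB x hx hR2
    beta_reduce
    have hxn : x < edges.length := List.mem_range.mp hx
    have hiff := hRel.2.2 x hxn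
    have hcnt : countA numbering (edges.getD x []) = countB edges placed x :=
      count_bridge edges hR numbering placed hRel x hxn
    have hnn : 0 ≤ countB edges placed x := countB_nonneg edges placed x
    by_cases hc : numbering.getD x 0 = -1
    · have hpc : placed.getD x false = false := by
        cases hpv : placed.getD x false with
        | false => rfl
        | true => exact absurd (hiff.mpr hpv) (fun hne => hne hc)
      rw [if_pos hc, if_pos hpc]
      dsimp only
      rcases hR2.2 with ⟨hA2, hB2⟩ | ⟨m, hA2, hB2, hm⟩
      · rw [hA2, hB2, hcnt]
        dsimp only
        rw [if_pos (by omega)]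
        exact ⟨rfl, Or.inr ⟨countB edges placed x, rfl, rfl, hnn⟩⟩
      · rw [hA2, hB2, hcnt]
        dsimp only
        by_cases hgt : countB edges placed x > m
        · rw [if_pos hgt, if_pos hgt]
          exact ⟨rfl, Or.inr ⟨countB edges placed x, rfl, rfl, hnn⟩⟩
        · rw [if_neg hgt, if_neg hgt]
          exact ⟨hR2.1, Or.inr ⟨m, hA2, hB2, hm⟩⟩
    · have hpc : placed.getD x false = true := hiff.mp hc
      rw [if_neg hc, if_neg (by rw [hpc]; decide)]
      exact hR2

-- ---- the invariant of A's backtracking state, and the extension predicate ----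

def InvA (edges : List (List Int)) (j : Nat) (numbering : List Int) (used : List Bool) : Prop :=
  numbering.length = edges.length ∧ used.length = edges.length ∧
  (∀ i, i < edges.length → ((numbering.getD i 0 ≠ -1) ↔ posF edges i < j)) ∧
  (∀ i, i < edges.length → numbering.getD i 0 ≠ -1 →
      0 ≤ numbering.getD i 0 ∧ numbering.getD i 0 < (edges.length:Int)) ∧
  (∀ i i', i < edges.length → i' < edges.length → i ≠ i' →
      numbering.getD i 0 ≠ -1 → numbering.getD i' 0 ≠ -1 →
      numbering.getD i 0 ≠ numbering.getD i' 0) ∧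
  (∀ m, m < edges.length →
      (used.getD m false = true ↔ ∃ i, i < edges.length ∧ numbering.getD i 0 = (m:Int)))

def ExtOf (edges : List (List Int)) (numbering p : List Int) : Prop :=
  ∀ i, i < edges.length → numbering.getD i 0 ≠ -1 → p.getD i 0 = numbering.getD i 0

def FutOf (edges : List (List Int)) (bw : Int) (j : Nat) (p : List Int) : Prop :=
  ∀ u, u < edges.length → j ≤ posF edges u → ∀ v ∈ edges.getD u [],
    posF edges (nidx edges.length v) < posF edges u →
    |p.getD u 0 - p.getD (nidx edges.length v) 0| ≤ bw

lemma getD_set_self' {α : Type} (l : List α) (i : Nat) (a d : α) (h : i < l.length) :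
    (l.set i a).getD i d = a := by
  simp [List.getD, List.getElem?_set_self h]

lemma getD_set_ne' {α : Type} (l : List α) (i i' : Nat) (a d : α) (h : i ≠ i') :
    (l.set i a).getD i' d = l.getD i' d := by
  simp [List.getD, List.getElem?_set_ne h]

lemma perm_getD_mem (n : Nat) (p : List Int) (hp : p.Perm (intRangeL n)) (u : Nat) (hu : u < n) :
    ∃ m : Nat, m < n ∧ p.getD u 0 = (m:Int) := by
  have hplen : p.length = n := by rw [hp.length_eq, length_intRangeL]
  have hm : p.getD u 0 ∈ p := by
    rw [List.getD_eq_getElem p 0 (by omega)]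
    exact List.getElem_mem _
  rw [hp.mem_iff, mem_intRangeL] at hm
  exact hm

lemma perm_getD_inj (n : Nat) (p : List Int) (hp : p.Perm (intRangeL n)) (u u' : Nat)
    (hu : u < n) (hu' : u' < n) (hne : u ≠ u') : p.getD u 0 ≠ p.getD u' 0 := by
  have hplen : p.length = n := by rw [hp.length_eq, length_intRangeL]
  have hnd : p.Nodup := hp.nodup_iff.mpr (nodup_intRangeL n)
  rw [List.getD_eq_getElem p 0 (by omega), List.getD_eq_getElem p 0 (by omega)]
  intro h
  exact hne ((List.Nodup.getElem_inj_iff hnd).mp h)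

lemma validA_iff (numbering nbrs : List Int) (num limit : Int) :
    validA numbering nbrs num limit = true ↔
      ∀ v ∈ nbrs, aGet numbering v = -1 ∨ |num - aGet numbering v| ≤ limit := by
  unfold validA
  rw [List.all_eq_true]
  refine forall_congr' fun v => forall_congr' fun _ => ?_
  simp

lemma futOf_mono (edges : List (List Int)) (bw : Int) (j : Nat) (p : List Int)
    (h : FutOf edges bw j p) : FutOf edges bw (j+1) p :=
  fun u hu hj v hv hlt => h u hu (by omega) v hv hlt

lemma invA_succ (edges : List (List Int)) (j : Nat) (numbering : List Int) (used : List Bool)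
    (hInv : InvA edges j numbering used) (ndn : Nat) (hndn : ndn < edges.length)
    (hposnd : posF edges ndn = j) (num : Nat) (hnum : num < edges.length)
    (hnused : used.getD num false = false) :
    InvA edges (j+1) (numbering.set ndn (num:Int)) (used.set num true) := by
  obtain ⟨hln, hlu, hstat, hrange, hinj, hused⟩ := hInv
  have hndunass : numbering.getD ndn 0 = -1 := by
    by_contra hne
    have := (hstat ndn hndn).mp hne
    omega
  refine ⟨by simpa using hln, by simpa using hlu, ?_, ?_, ?_, ?_⟩
  · intro i hi
    by_cases hieq : i = ndn
    · subst hieq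
      rw [getD_set_self' numbering i (num:Int) 0 (by omega)]
      constructor
      · intro _; omega
      · intro _; exact fun h => by omega
    · rw [getD_set_ne' numbering ndn i (num:Int) 0 (fun h => hieq h.symm)]
      rw [hstat i hi]
      have : posF edges i ≠ j := fun h => hieq (posF_inj edges i ndn hi hndn (h.trans hposnd.symm))
      omega
  · intro i hi hne
    by_cases hieq : i = ndn
    · subst hieq
      rw [getD_set_self' numbering i (num:Int) 0 (by omega)]
      constructor <;> omega
    · rw [getD_set_ne' numbering ndn i (num:Int) 0 (fun h => hieq h.symm)] at hne ⊢
      exact hrange i hi hne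
  · intro i i' hi hi' hne hai hai'
    by_cases hieq : i = ndn
    · subst hieq
      rw [getD_set_self' numbering i (num:Int) 0 (by omega)]
      rw [getD_set_ne' numbering i i' (num:Int) 0 hne] at hai' ⊢
      intro heq
      have : used.getD num false = true := (hused num hnum).mpr ⟨i', hi', heq.symm⟩
      rw [hnused] at this; exact Bool.false_ne_true this
    · rw [getD_set_ne' numbering ndn i (num:Int) 0 (fun h => hieq h.symm)] at hai ⊢
      by_cases hieq' : i' = ndn
      · subst hieq'
        rw [getD_set_self' numbering i' (num:Int) 0 (by omega)]
        intro heq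
        have : used.getD num false = true := (hused num hnum).mpr ⟨i, hi, heq⟩
        rw [hnused] at this; exact Bool.false_ne_true this
      · rw [getD_set_ne' numbering ndn i' (num:Int) 0 (fun h => hieq' h.symm)] at hai' ⊢
        exact hinj i i' hi hi' hne hai hai'
  · intro m hm
    by_cases hmeq : m = num
    · subst hmeq
      rw [getD_set_self' used m true false (by omega)]
      constructor
      · intro _
        exact ⟨ndn, hndn, getD_set_self' numbering ndn (m:Int) 0 (by omega)⟩
      · intro _; rfl
    · rw [getD_set_ne' used num m true false (fun h => hmeq h.symm)]
      rw [hused m hm]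
      constructor
      · rintro ⟨i, hi, hieq⟩
        refine ⟨i, hi, ?_⟩
        have hine : i ≠ ndn := by
          intro h; subst h
          rw [hieq] at hndunass
          omega
        rw [getD_set_ne' numbering ndn i (num:Int) 0 (fun h => hine h.symm)]
        exact hieq
      · rintro ⟨i, hi, hieq⟩
        have hine : i ≠ ndn := by
          intro h
          rw [h, getD_set_self' numbering ndn (num:Int) 0 (by omega)] at hieq
          omega
        refine ⟨i, hi, ?_⟩
        rw [getD_set_ne' numbering ndn i (num:Int) 0 (fun h => hine h.symm)] at hieq
        exact hieq

lemma btA_iff (edges : List (List Int)) (hR : InRangeE edges) (bw : Int) :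
    ∀ (k j : Nat) (numbering : List Int) (used : List Bool),
      j + k = edges.length → InvA edges j numbering used →
      (btA edges bw k numbering used = true ↔
        ∃ p : List Int, p.Perm (intRangeL edges.length) ∧ ExtOf edges numbering p ∧ FutOf edges bw j p) := by
  intro k
  induction k with
  | zero =>
    intro j numbering used hjk hInv
    obtain ⟨hln, hlu, hstat, hrange, hinj, hused⟩ := hInv
    have hj : j = edges.length := by omega
    subst hj
    constructor
    · intro _
      have hassigned : ∀ i, i < edges.length → numbering.getD i 0 ≠ -1 := by
        intro i hi
        exact (hstat i hi).mpr (posF_lt edges i hi)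
      have hsub : numbering ⊆ intRangeL edges.length := by
        intro x hx
        rcases List.mem_iff_getElem.mp hx with ⟨i, hilt, hieq⟩
        have hi : i < edges.length := by omega
        have hxd : numbering.getD i 0 = x := by
          rw [List.getD_eq_getElem numbering 0 hilt]; exact hieq
        have hr := hrange i hi (hxd ▸ hassigned i hi)
        rw [hxd] at hr
        exact (mem_intRangeL edges.length x).mpr ⟨x.toNat, by omega, by omega⟩
      have hnd : numbering.Nodup := by
        refine nodup_of_getElem_ne numbering ?_
        intro i hilt i' hilt' hne
        have hi : i < edges.length := by omega
        have hi' : i' < edges.length := by omega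
        have h := hinj i i' hi hi' hne
          (hassigned i hi) (hassigned i' hi')
        rw [List.getD_eq_getElem numbering 0 hilt, List.getD_eq_getElem numbering 0 hilt'] at h
        exact h
      refine ⟨numbering, (List.subperm_of_subset hnd hsub).perm_of_length_le
        (by rw [length_intRangeL, hln]), fun i _ _ => rfl, ?_⟩
      intro u hu hpos v hv hlt
      exact absurd hpos (by have := posF_lt edges u hu; omega)
    · intro _; rfl
  | succ k ih =>
    intro j numbering used hjk hInv
    have hInvKeep := hInv
    obtain ⟨hln, hlu, hstat, hrange, hinj, hused⟩ := hInv
    have hjlt : j < edges.length := by omega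
    have hRel : NRel edges numbering (stJ edges j).1 := by
      refine ⟨hln, (goodSt_stJ edges j (le_of_lt hjlt)).1, ?_⟩
      intro i hi
      rw [hstat i hi, stJ1_char edges j (le_of_lt hjlt) i hi]
    obtain ⟨ndn, hndn, hndeq⟩ : ∃ m : Nat, m < edges.length ∧
        (ordF edges)[j]'(by rw [length_ordF]; exact hjlt) = (m:Int) := by
      have hmem : (ordF edges)[j]'(by rw [length_ordF]; exact hjlt) ∈ ordF edges :=
        List.getElem_mem _
      rw [(ordF_perm edges).mem_iff, mem_intRangeL] at hmem
      exact hmem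
    have hpickA : (pickA edges numbering).1 = (ndn : Int) := by
      rw [pick_bridge edges hR numbering (stJ edges j).1 hRel, pick_stJ edges j hjlt, hndeq]
    have hposnd : posF edges ndn = j := by
      have := List.Nodup.idxOf_getElem (nodup_ordF edges) j (by rw [length_ordF]; exact hjlt)
      unfold posF
      rw [← hndeq]
      exact this
    have hndunass : numbering.getD ndn 0 = -1 := by
      by_contra hne
      have := (hstat ndn hndn).mp hne
      omega
    have hbteq : btA edges bw (k+1) numbering used =
        ((List.range numbering.length).any fun num =>
          !(used.getD num false) &&
          validA numbering (edges.getD ((pickA edges numbering).1).toNat []) (num : Int) bw &&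
          btA edges bw k (numbering.set ((pickA edges numbering).1).toNat (num : Int))
            (used.set num true)) := rfl
    rw [hbteq, hpickA, Int.toNat_natCast, List.any_eq_true]
    constructor
    · rintro ⟨num, hnummem, hconj⟩
      rw [Bool.and_eq_true, Bool.and_eq_true] at hconj
      obtain ⟨⟨hnused', hvalid⟩, hrec⟩ := hconj
      have hnused : used.getD num false = false := by
        cases h : used.getD num false with
        | false => rfl
        | true => rw [h] at hnused'; exact absurd hnused' (by decide)
      have hnum : num < edges.length := by
        have := List.mem_range.mp hnummem; omega
      have hInv' := invA_succ edges j numbering used hInvKeep ndn hndn hposnd num hnum hnused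
      obtain ⟨p, hperm, hext', hfut'⟩ :=
        (ih (j+1) (numbering.set ndn (num:Int)) (used.set num true) (by omega) hInv').mp hrec
      refine ⟨p, hperm, ?_, ?_⟩
      · intro i hi hia
        have hine : i ≠ ndn := fun h => by rw [h, hndunass] at hia; exact hia rfl
        have h1 : (numbering.set ndn (num:Int)).getD i 0 = numbering.getD i 0 :=
          getD_set_ne' numbering ndn i (num:Int) 0 (fun h => hine h.symm)
        have := hext' i hi (by rw [h1]; exact hia)
        rw [h1] at this
        exact this
      · intro u hu hj2 v hv hlt
        by_cases hjeq : posF edges u = j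
        · have huen : u = ndn := posF_inj edges u ndn hu hndn (hjeq.trans hposnd.symm)
          rw [huen] at hv ⊢
          rw [hjeq] at hlt
          obtain ⟨hv1, hv2⟩ := hR ndn hndn v hv
          have hnidx := nidx_lt edges.length v hv1 hv2
          have hxa : aGet numbering v = numbering.getD (nidx edges.length v) 0 :=
            getD_pyGet?_nidx numbering edges.length v 0 hln hv1 hv2
          have hva := (validA_iff numbering (edges.getD ndn []) (num:Int) bw).mp hvalid v hv
          have hassv : numbering.getD (nidx edges.length v) 0 ≠ -1 := by
            rw [hstat (nidx edges.length v) hnidx]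
            omega
          rcases hva with hva | hva
          · rw [hxa] at hva; exact absurd hva hassv
          · rw [hxa] at hva
            have hvne : nidx edges.length v ≠ ndn := by
              intro h; rw [h, hposnd] at hlt; omega
            have hp1 : p.getD ndn 0 = (num:Int) := by
              have := hext' ndn hndn (by
                rw [getD_set_self' numbering ndn (num:Int) 0 (by omega)]; omega)
              rw [getD_set_self' numbering ndn (num:Int) 0 (by omega)] at this
              exact this
            have hp2 : p.getD (nidx edges.length v) 0 = numbering.getD (nidx edges.length v) 0 := by
              have heq : (numbering.set ndn (num:Int)).getD (nidx edges.length v) 0 =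
                  numbering.getD (nidx edges.length v) 0 :=
                getD_set_ne' numbering ndn (nidx edges.length v) (num:Int) 0 (fun h => hvne h.symm)
              have := hext' (nidx edges.length v) hnidx (by rw [heq]; exact hassv)
              rw [heq] at this
              exact this
            rw [hp1, hp2]
            exact hva
        · exact hfut' u hu (by omega) v hv hlt
    · rintro ⟨p, hperm, hext, hfut⟩
      obtain ⟨num, hnum, hnumeq⟩ := perm_getD_mem edges.length p hperm ndn hndn
      have hnused : used.getD num false = false := by
        cases h : used.getD num false with
        | false => rfl
        | true =>
          obtain ⟨i, hi, hieq⟩ := (hused num hnum).mp h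
          have hia : numbering.getD i 0 ≠ -1 := by rw [hieq]; omega
          have hine : i ≠ ndn := by
            intro hh; rw [hh, hndunass] at hieq; omega
          have := hext i hi hia
          rw [hieq] at this
          rw [← hnumeq] at this
          exact absurd this (perm_getD_inj edges.length p hperm i ndn hi hndn hine)
      refine ⟨num, List.mem_range.mpr (by omega), ?_⟩
      rw [Bool.and_eq_true, Bool.and_eq_true]
      have hvalid : validA numbering (edges.getD ndn []) (num:Int) bw = true := by
        rw [validA_iff]
        intro v hv
        by_cases hva : aGet numbering v = -1
        · exact Or.inl hva
        · right
          obtain ⟨hv1, hv2⟩ := hR ndn hndn v hv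
          have hnidx := nidx_lt edges.length v hv1 hv2
          have hxa : aGet numbering v = numbering.getD (nidx edges.length v) 0 :=
            getD_pyGet?_nidx numbering edges.length v 0 hln hv1 hv2
          rw [hxa] at hva ⊢
          have hlt : posF edges (nidx edges.length v) < posF edges ndn := by
            rw [hposnd]
            exact lt_of_lt_of_le ((hstat (nidx edges.length v) hnidx).mp hva) le_rfl
          have := hfut ndn hndn (by omega) v hv hlt
          rw [hnumeq] at this
          rw [hext (nidx edges.length v) hnidx hva] at this
          exact this
      refine ⟨⟨by rw [hnused]; rfl, hvalid⟩, ?_⟩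
      have hInv' := invA_succ edges j numbering used hInvKeep ndn hndn hposnd num hnum hnused
      refine (ih (j+1) (numbering.set ndn (num:Int)) (used.set num true) (by omega) hInv').mpr ?_
      refine ⟨p, hperm, ?_, futOf_mono edges bw j p hfut⟩
      intro i hi hia
      by_cases hieq : i = ndn
      · rw [hieq] at hia ⊢
        rw [getD_set_self' numbering ndn (num:Int) 0 (by omega)]
        exact hnumeq
      · rw [getD_set_ne' numbering ndn i (num:Int) 0 (fun h => hieq h.symm)] at hia ⊢
        exact hext i hi hia

lemma invA_zero (edges : List (List Int)) :
    InvA edges 0 (List.replicate edges.length (-1)) (List.replicate edges.length false) := by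
  have hgd : ∀ i, i < edges.length → (List.replicate edges.length (-1:Int)).getD i 0 = -1 := by
    intro i hi
    rw [List.getD_eq_getElem _ 0 (by simpa using hi), List.getElem_replicate]
  have hgu : ∀ m, m < edges.length → (List.replicate edges.length false).getD m false = false := by
    intro m hm
    rw [List.getD_eq_getElem _ false (by simpa using hm), List.getElem_replicate]
  refine ⟨by simp, by simp, ?_, ?_, ?_, ?_⟩
  · intro i hi
    rw [hgd i hi]
    simp
  · intro i hi hne
    exact absurd (hgd i hi) hne
  · intro i i' hi hi' _ hne _
    exact absurd (hgd i hi) hne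
  · intro m hm
    rw [hgu m hm]
    constructor
    · intro h; exact absurd h (by decide)
    · rintro ⟨i, hi, hieq⟩
      rw [hgd i hi] at hieq
      omega

lemma mem_permutations_of_perm {α : Type} :
    ∀ (p xs : List α), p.Perm xs → p ∈ PySem.List.permutations xs p.length
  | [], xs, h => by
      have hx : xs = [] := (List.nil_perm).mp h
      subst hx
      simp [PySem.List.permutations_zero]
  | a :: p, xs, h => by
      have hmem : a ∈ xs := h.subset List.mem_cons_self
      obtain ⟨i, hilt, hieq⟩ := List.mem_iff_getElem.mp hmem
      have hopt : xs[i]? = some a := by rw [List.getElem?_eq_getElem hilt, hieq]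
      have hperm2 : p.Perm (xs.eraseIdx i) := by
        have h2 : (a :: xs.eraseIdx i).Perm xs := PySem.List.perm_cons_eraseIdx xs hopt
        exact (h.trans h2.symm).cons_inv
      have hrec := mem_permutations_of_perm p (xs.eraseIdx i) hperm2
      show (a :: p) ∈ PySem.List.permutations xs (p.length + 1)
      rw [PySem.List.permutations_succ, List.mem_flatMap]
      refine ⟨i, List.mem_range.mpr hilt, ?_⟩
      rw [hopt]
      exact List.mem_map.mpr ⟨p, hrec, rfl⟩

-- B's all-listed-edges check agrees with A's order-filtered constraint set, by symmetry of the lists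
lemma checkB_iff (edges : List (List Int)) (hR : InRangeE edges) (hS : SymE edges)
    (bw : Int) (hbw : 1 ≤ bw) (p : List Int) (hperm : p.Perm (intRangeL edges.length)) :
    (checkB p edges bw = true) ↔ FutOf edges bw 0 p := by
  unfold checkB
  have hplen : p.length = edges.length := by rw [hperm.length_eq, length_intRangeL]
  have hbr : ∀ u, u < edges.length → ∀ v ∈ edges.getD u [],
      bGetI p v = p.getD (nidx edges.length v) 0 := by
    intro u hu v hv
    obtain ⟨hv1, hv2⟩ := hR u hu v hv
    exact getD_pyGet?_nidx p edges.length v 0 hplen hv1 hv2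
  simp only [List.all_eq_true, List.mem_range, decide_eq_true_eq]
  constructor
  · intro h u hu _ v hv hlt
    have := h u hu v hv
    rw [hbr u hu v hv] at this
    exact this
  · intro h u hu v hv
    rw [hbr u hu v hv]
    obtain ⟨hv1, hv2⟩ := hR u hu v hv
    have hnv := nidx_lt edges.length v hv1 hv2
    rcases Nat.lt_trichotomy (posF edges (nidx edges.length v)) (posF edges u) with hlt | heq | hgt
    · exact h u hu (Nat.zero_le _) v hv hlt
    · have : nidx edges.length v = u := posF_inj edges _ u hnv hu heq
      rw [this, sub_self, abs_zero]
      omega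
    · obtain ⟨w, hw, hwu⟩ := hS u hu v hv
      have := h (nidx edges.length v) hnv (Nat.zero_le _) w hw (by rw [hwu]; exact hgt)
      rw [hwu] at this
      rw [abs_sub_comm]
      exact this

-- the two feasibility tests agree
lemma feas_iff (edges : List (List Int)) (hR : InRangeE edges) (hS : SymE edges)
    (bw : Int) (hbw : 1 ≤ bw) :
    (btA edges bw edges.length (List.replicate edges.length (-1)) (List.replicate edges.length false) = true)
    ↔ ((PySem.List.permutations (intRangeL edges.length) edges.length).any fun p =>
        checkB p edges bw) = true := by
  rw [btA_iff edges hR bw edges.length 0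
    (List.replicate edges.length (-1)) (List.replicate edges.length false) (by omega) (invA_zero edges)]
  rw [List.any_eq_true]
  constructor
  · rintro ⟨p, hperm, _, hfut⟩
    refine ⟨p, ?_, (checkB_iff edges hR hS bw hbw p hperm).mpr hfut⟩
    have hlen2 : p.length = edges.length := by rw [hperm.length_eq, length_intRangeL]
    have hm := mem_permutations_of_perm p (intRangeL edges.length) hperm
    rw [hlen2] at hm
    exact hm
  · rintro ⟨p, hmem, hchk⟩
    have hperm : p.Perm (intRangeL edges.length) := by
      have := PySem.List.perm_of_mem_permutations (xs := intRangeL edges.length) (p := p)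
      rw [length_intRangeL] at this
      exact this hmem
    refine ⟨p, hperm, ?_, (checkB_iff edges hR hS bw hbw p hperm).mp hchk⟩
    intro i hi hia
    rw [List.getD_eq_getElem (List.replicate edges.length (-1:Int)) 0 (by simpa using hi),
      List.getElem_replicate] at hia
    exact absurd rfl hia

-- on two nodes every numbering satisfies any limit >= 1, so both tests succeed
lemma feas_two (edges : List (List Int)) (hR : InRangeE edges) (hlen : edges.length = 2)
    (bw : Int) (hbw : 1 ≤ bw) :
    btA edges bw edges.length (List.replicate edges.length (-1)) (List.replicate edges.length false) = true
    ∧ ((PySem.List.permutations (intRangeL edges.length) edges.length).any fun p =>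
        checkB p edges bw) = true := by
  have hid : ∀ u, u < edges.length → (intRangeL edges.length).getD u 0 = (u:Int) :=
    fun u hu => getD_intRangeL edges.length u hu
  have hbound : ∀ u u' : Nat, u < edges.length → u' < edges.length →
      |(u:Int) - (u':Int)| ≤ bw := by
    intro u u' hu hu'
    rw [hlen] at hu hu'
    rcases abs_cases ((u:Int) - (u':Int)) with ⟨h, _⟩ | ⟨h, _⟩ <;> omega
  have hfut : FutOf edges bw 0 (intRangeL edges.length) := by
    intro u hu _ v hv _
    obtain ⟨hv1, hv2⟩ := hR u hu v hv
    have hnv := nidx_lt edges.length v hv1 hv2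
    rw [hid u hu, hid (nidx edges.length v) hnv]
    exact hbound u (nidx edges.length v) hu hnv
  constructor
  · rw [btA_iff edges hR bw edges.length 0
      (List.replicate edges.length (-1)) (List.replicate edges.length false) (by omega) (invA_zero edges)]
    refine ⟨intRangeL edges.length, List.Perm.refl _, ?_, hfut⟩
    intro i hi hia
    rw [List.getD_eq_getElem (List.replicate edges.length (-1:Int)) 0 (by simpa using hi),
      List.getElem_replicate] at hia
    exact absurd rfl hia
  · rw [List.any_eq_true]
    refine ⟨intRangeL edges.length, ?_, ?_⟩
    · have hm := mem_permutations_of_perm (intRangeL edges.length) (intRangeL edges.length)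
        (List.Perm.refl _)
      rw [length_intRangeL] at hm
      exact hm
    · unfold checkB
      simp only [List.all_eq_true, List.mem_range, decide_eq_true_eq]
      intro u hu v hv
      obtain ⟨hv1, hv2⟩ := hR u hu v hv
      have hnv := nidx_lt edges.length v hv1 hv2
      have hplen : (intRangeL edges.length).length = edges.length := length_intRangeL _
      rw [show bGetI (intRangeL edges.length) v = (intRangeL edges.length).getD (nidx edges.length v) 0 from
        getD_pyGet?_nidx _ edges.length v 0 hplen hv1 hv2]
      rw [hid u hu, hid (nidx edges.length v) hnv]
      exact hbound u (nidx edges.length v) hu hnv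

-- ===== VERDICT (by name: the statement is the Claim_ definition above) =====
theorem bandwidth_spec : Claim_equal_bandwidth := by
  intro edges _ hPre
  show bandwidth edges = bandwidth_alt edges
  rcases hPre with hsmall | ⟨hR, hPre2⟩
  · have h0 : PySem.List.pyRange 1 (edges.length : Int) 1 = [] :=
      PySem.List.pyRange_one_eq_nil (by exact_mod_cast hsmall)
    simp only [bandwidth, bandwidth_alt, h0, List.find?_nil, Option.getD_none]
  · have hR : InRangeE edges := hR
    rcases hPre2 with h2 | hS
    · by_cases hsmall : edges.length ≤ 1
      · have h0 : PySem.List.pyRange 1 (edges.length : Int) 1 = [] :=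
          PySem.List.pyRange_one_eq_nil (by exact_mod_cast hsmall)
        simp only [bandwidth, bandwidth_alt, h0, List.find?_nil, Option.getD_none]
      · have hlen : edges.length = 2 := by omega
        have hr2 : PySem.List.pyRange 1 (edges.length : Int) 1 = [1] := by
          rw [hlen]; decide
        obtain ⟨hA, hB⟩ := feas_two edges hR hlen 1 le_rfl
        show ((PySem.List.pyRange 1 (edges.length:Int) 1).find? fun bw =>
            btA edges bw edges.length (List.replicate edges.length (-1)) (List.replicate edges.length false)).getD ((edges.length:Int) - 1)
          = ((PySem.List.pyRange 1 (edges.length:Int) 1).find? fun bw =>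
            (PySem.List.permutations (intRangeL edges.length) edges.length).any fun p =>
              checkB p edges bw).getD ((edges.length:Int) - 1)
        rw [hr2]
        simp only [List.find?_cons, hA, hB]
    · have hpt : ∀ bw ∈ PySem.List.pyRange 1 (edges.length:Int) 1,
          btA edges bw edges.length (List.replicate edges.length (-1)) (List.replicate edges.length false)
          = ((PySem.List.permutations (intRangeL edges.length) edges.length).any fun p =>
              checkB p edges bw) := by
        intro bw hbwmem
        have hbw1 : 1 ≤ bw := (PySem.List.mem_pyRange_one.mp hbwmem).1
        have h := feas_iff edges hR hS bw hbw1
        exact Bool.eq_iff_iff.mpr (by simpa using h)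
      have hfind := find?_congr
        (fun bw => btA edges bw edges.length (List.replicate edges.length (-1)) (List.replicate edges.length false))
        (fun bw => (PySem.List.permutations (intRangeL edges.length) edges.length).any fun p =>
            checkB p edges bw)
        (PySem.List.pyRange 1 (edges.length:Int) 1) hpt
      show ((PySem.List.pyRange 1 (edges.length:Int) 1).find? fun bw =>
          btA edges bw edges.length (List.replicate edges.length (-1)) (List.replicate edges.length false)).getD ((edges.length:Int) - 1)
        = ((PySem.List.pyRange 1 (edges.length:Int) 1).find? fun bw =>
          (PySem.List.permutations (intRangeL edges.length) edges.length).any fun p =>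
            checkB p edges bw).getD ((edges.length:Int) - 1)
      rw [hfind]
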